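-- pv_equiv track=rewrite | github.com/pauloluniyi/VGEA | scripts/tools/AuxiliaryFunctions.py | PropagateNoCoverageChar
-- ===== SOURCE A (Python) =====
-- def PropagateNoCoverageChar(seq, LeftToRightDone=False):
--   '''Replaces gaps that border "no coverage" by "no coverage".
--
--   Where NoCoverageChars neighbour GapChars, propagate the former outwards until
--   they touch bases on both sides (because deletions should only be called when
--   the bases on either side are known). e.g.
--   ACTG---?---ACTG
--   becomes
--   ACTG???????ACTG'''
--
--   if LeftToRightDone:
--     seq = seq[::-1]
--   BaseToLeftIsNoCoverage = False
--   ResultingSeq = ''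
--   for base in seq:
--     if base == '?':
--       BaseToLeftIsNoCoverage = True
--       ResultingSeq += '?'
--     elif base == '-':
--       if BaseToLeftIsNoCoverage:
--         ResultingSeq += '?'
--       else:
--         ResultingSeq += '-'
--     else:
--       BaseToLeftIsNoCoverage = False
--       ResultingSeq += base
--   if LeftToRightDone:
--     ResultingSeq = ResultingSeq[::-1]
--   else:
--     ResultingSeq = PropagateNoCoverageChar(ResultingSeq, True)
--   return ResultingSeq
-- ===== SOURCE B (Python) =====
-- def PropagateNoCoverageChar(seq, LeftToRightDone=False):
--   '''Replaces gaps that border "no coverage" by "no coverage".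
--
--   A gap character '-' next to a '?' becomes '?', cascading through the whole
--   gap run. The rightward sweep is skipped when LeftToRightDone says it was
--   already performed.'''
--   chars = list(seq)
--   n = len(chars)
--   if not LeftToRightDone:
--     # spread '?' rightwards into adjacent gaps
--     for i in range(1, n):
--       if chars[i] == '-' and chars[i - 1] == '?':
--         chars[i] = '?'
--   # spread '?' leftwards into adjacent gaps
--   for i in range(n - 2, -1, -1):
--     if chars[i] == '-' and chars[i + 1] == '?':
--       chars[i] = '?'
--   return ''.join(chars)
-- ===== Notes on version B (the rewrite author's own statement) =====
-- stated objective: simpler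
-- what changed: A rebuilds the string with a carried flag, reverses it and recurses on itself for the second direction; B mutates a character list in place with two plain neighbour-propagation index sweeps (no reversal, no recursion, no accumulator flag).
import Mathlib
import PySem

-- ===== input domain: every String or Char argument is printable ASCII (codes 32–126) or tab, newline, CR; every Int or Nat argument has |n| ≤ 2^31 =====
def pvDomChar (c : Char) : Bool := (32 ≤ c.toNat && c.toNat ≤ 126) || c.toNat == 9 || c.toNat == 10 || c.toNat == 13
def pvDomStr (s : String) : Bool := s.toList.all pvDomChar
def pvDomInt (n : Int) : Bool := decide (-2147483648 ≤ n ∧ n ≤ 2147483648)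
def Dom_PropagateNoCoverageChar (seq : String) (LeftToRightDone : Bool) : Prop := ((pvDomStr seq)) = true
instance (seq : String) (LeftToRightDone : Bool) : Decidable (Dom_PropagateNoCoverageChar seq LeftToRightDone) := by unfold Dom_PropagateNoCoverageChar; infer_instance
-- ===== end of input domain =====

-- B replaces A's flag-carrying string rebuild + reversal + recursive self-call by two
-- in-place neighbour-propagation sweeps over a character list. objective: simpler.

-- ===== PORT A =====
-- loop body of `for base in seq`, state = (BaseToLeftIsNoCoverage, ResultingSeq)
def pvAStep (st : Bool × List Char) (base : Char) : Bool × List Char :=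
  if base = '?' then (true, st.2 ++ ['?'])
  else if base = '-' then (st.1, st.2 ++ [if st.1 then '?' else '-'])
  else (false, st.2 ++ [base])

def PropagateNoCoverageChar (seq : String) (LeftToRightDone : Bool) : String :=
  -- `seq = seq[::-1]` (exact: reversal of the character list)
  let s := if LeftToRightDone then seq.toList.reverse else seq.toList
  let r := (s.foldl pvAStep (false, ([] : List Char))).2
  match LeftToRightDone with
  | true => String.ofList r.reverse        -- ResultingSeq = ResultingSeq[::-1]
  | false => PropagateNoCoverageChar (String.ofList r) true
termination_by (if LeftToRightDone then 0 else 1 : Nat)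
decreasing_by simp

-- ===== PORT B =====
-- `for i in range(1, n): if chars[i] == '-' and chars[i-1] == '?': chars[i] = '?'`
-- ported as recursion on the index i; every index used lies in [0, n), so Nat
-- indexing with getD is exact for Python's chars[i] here.
def pvFwd (chars : List Char) (i : Nat) : List Char :=
  if h : i < chars.length then
    pvFwd (if chars.getD i ' ' = '-' ∧ chars.getD (i - 1) ' ' = '?'
           then chars.set i '?' else chars) (i + 1)
  else chars
termination_by chars.length - i
decreasing_by
  split
  · simp only [List.length_set]; omega
  · omega

-- `for i in range(n - 2, -1, -1): if chars[i] == '-' and chars[i+1] == '?': chars[i] = '?'`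
-- ported as recursion counting down; the argument k is i + 1 (k = 0 ends the loop).
def pvBwd (chars : List Char) : Nat → List Char
  | 0 => chars
  | k + 1 =>
    pvBwd (if chars.getD k ' ' = '-' ∧ chars.getD (k + 1) ' ' = '?'
           then chars.set k '?' else chars) k

def PropagateNoCoverageChar_alt (seq : String) (LeftToRightDone : Bool) : String :=
  let chars := seq.toList
  let n := chars.length
  let c1 := if LeftToRightDone then chars else pvFwd chars 1
  String.ofList (pvBwd c1 (n - 1))

-- ===== PRECONDITION & SPEC =====
def Spec_PropagateNoCoverageChar (seq : String) (LeftToRightDone : Bool) (out : String) : Prop := out = PropagateNoCoverageChar_alt seq LeftToRightDone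
instance (seq : String) (LeftToRightDone : Bool) (out : String) : Decidable (Spec_PropagateNoCoverageChar seq LeftToRightDone out) := by unfold Spec_PropagateNoCoverageChar; infer_instance

-- ===== CLAIM (what is proved, stated in full; the proofs are below) =====
def Claim_equal_PropagateNoCoverageChar : Prop := ∀ (seq : String) (LeftToRightDone : Bool), Dom_PropagateNoCoverageChar seq LeftToRightDone → Spec_PropagateNoCoverageChar seq LeftToRightDone (PropagateNoCoverageChar seq LeftToRightDone)

-- ===== LEMMAS AND PROOFS =====

-- recursive formulation of A's forward pass and its running flag
def pvNb (b : Bool) (c : Char) : Bool := if c = '?' then true else if c = '-' then b else false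
def pvOut (b : Bool) (c : Char) : Char := if c = '?' then '?' else if c = '-' then (if b then '?' else '-') else c
def pvPass1 (b : Bool) : List Char → List Char
  | [] => []
  | c :: cs => pvOut b c :: pvPass1 (pvNb b c) cs

theorem pvAStep_eq (st : Bool × List Char) (c : Char) :
    pvAStep st c = (pvNb st.1 c, st.2 ++ [pvOut st.1 c]) := by
  by_cases h1 : c = '?'
  · simp [pvAStep, pvNb, pvOut, h1]
  · by_cases h2 : c = '-'
    · cases hst : st.1 <;> simp [pvAStep, pvNb, pvOut, h1, h2, hst]
    · simp [pvAStep, pvNb, pvOut, h1, h2]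

theorem foldl_eq_pass1 (s : List Char) (b : Bool) (acc : List Char) :
    (s.foldl pvAStep (b, acc)).2 = acc ++ pvPass1 b s := by
  induction s generalizing b acc with
  | nil => simp [pvPass1]
  | cons c cs ih => simp only [List.foldl, pvAStep_eq, pvPass1]; rw [ih]; simp

theorem pass1_length (b : Bool) (s : List Char) : (pvPass1 b s).length = s.length := by
  induction s generalizing b with
  | nil => rfl
  | cons c cs ih => simp [pvPass1, ih]

theorem portA_true (seq : String) :
    PropagateNoCoverageChar seq true = String.ofList (pvPass1 false seq.toList.reverse).reverse := by
  rw [PropagateNoCoverageChar]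
  show String.ofList ((seq.toList.reverse.foldl pvAStep (false, ([] : List Char))).2).reverse = _
  rw [foldl_eq_pass1]
  simp

theorem portA_false (seq : String) :
    PropagateNoCoverageChar seq false =
      PropagateNoCoverageChar (String.ofList (pvPass1 false seq.toList)) true := by
  conv_lhs => rw [PropagateNoCoverageChar]
  show PropagateNoCoverageChar (String.ofList ((seq.toList.foldl pvAStep (false, ([] : List Char))).2)) true = _
  rw [foldl_eq_pass1]
  simp

-- relation between the output char written by the sweeps and A's flag
theorem pvOut_flag (b : Bool) (r : Char) : decide (pvOut b r = '?') = pvNb b r := by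
  by_cases h1 : r = '?'
  · simp [pvOut, pvNb, h1]
  · by_cases h2 : r = '-'
    · cases b <;> simp [pvOut, pvNb, h1, h2]
    · simp [pvOut, pvNb, h1, h2]

-- the forward sweep, started past a processed nonempty prefix P, computes pass1
theorem pvFwd_go (rest P : List Char) (b : Bool) (hP : P ≠ [])
    (hb : decide (P.getLast? = some '?') = b) :
    pvFwd (P ++ rest) P.length = P ++ pvPass1 b rest := by
  induction rest generalizing P b with
  | nil => rw [pvFwd.eq_def]; simp [pvPass1]
  | cons r rs ih =>
    rw [pvFwd.eq_def]
    have hlen : P.length < (P ++ r :: rs).length := by simp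
    rw [dif_pos hlen]
    have hi : (P ++ r :: rs).getD P.length ' ' = r := by
      simp [List.getD, List.getElem?_append_right]
    have hprev : (P ++ r :: rs).getD (P.length - 1) ' ' = P.getLastD ' ' := by
      have h1 : P.length - 1 < P.length := by
        cases P with | nil => exact absurd rfl hP | cons a l => simp
      rw [List.getD, List.getElem?_append_left h1]
      rw [List.getLastD_eq_getLast?, List.getLast?_eq_getElem?]
    -- the updated list is P ++ pvOut b r :: rs
    have hupd : (if (P ++ r :: rs).getD P.length ' ' = '-' ∧ (P ++ r :: rs).getD (P.length - 1) ' ' = '?'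
                 then (P ++ r :: rs).set P.length '?' else (P ++ r :: rs))
                = P ++ pvOut b r :: rs := by
      rw [hi, hprev]
      have hlast : P.getLastD ' ' = '?' ↔ b = true := by
        rw [← hb, List.getLastD_eq_getLast?]
        cases hP2 : P.getLast? with
        | none => exact absurd (List.getLast?_eq_none_iff.mp hP2) hP
        | some a => simp
      by_cases h2 : r = '-'
      · by_cases h3 : P.getLastD ' ' = '?'
        · have hbt : b = true := hlast.mp h3
          rw [if_pos ⟨h2, h3⟩]
          simp [pvOut, h2, hbt, List.set_append_right, List.set_append]
        · have hbf : b = false := by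
            cases b with
            | true => exact absurd (hlast.mpr rfl) h3
            | false => rfl
          rw [if_neg (by tauto)]
          simp [pvOut, h2, hbf]
      · rw [if_neg (by tauto)]
        by_cases h1 : r = '?' <;> simp [pvOut, h1, h2]
    rw [hupd]
    have : P.length + 1 = (P ++ [pvOut b r]).length := by simp
    rw [show P ++ pvOut b r :: rs = (P ++ [pvOut b r]) ++ rs by simp]
    rw [this, ih (P ++ [pvOut b r]) (pvNb b r) (by simp) (by simp [pvOut_flag])]
    simp [pvPass1]

theorem pvFwd_eq (s : List Char) : pvFwd s 1 = pvPass1 false s := by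
  cases s with
  | nil => rw [pvFwd.eq_def]; simp [pvPass1]
  | cons c cs =>
    have h1 : (1 : Nat) = ([c] : List Char).length := rfl
    have := pvFwd_go cs [c] (pvNb false c) (by simp)
      (by by_cases h : c = '?' <;> by_cases h2 : c = '-' <;> simp_all [pvNb])
    simp only [List.singleton_append, List.length_singleton] at this
    rw [this]
    have hout : pvOut false c = c := by
      by_cases h : c = '?' <;> by_cases h2 : c = '-' <;> simp [pvOut, h, h2]
    simp [pvPass1, hout]

-- the backward sweep over a front, with processed suffix S, is pass1 on the reverse
theorem pvBwd_go (front S : List Char) (b : Bool) (hS : S ≠ [])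
    (hb : decide (S.head? = some '?') = b) :
    pvBwd (front ++ S) front.length = (pvPass1 b front.reverse).reverse ++ S := by
  induction front using List.reverseRecOn generalizing S b with
  | nil => simp [pvBwd, pvPass1]
  | append_singleton F r ih =>
    have hk : (F ++ [r]).length = F.length + 1 := by simp
    rw [hk, pvBwd]
    have hi : ((F ++ [r]) ++ S).getD F.length ' ' = r := by
      rw [List.append_assoc]
      simp [List.getD, List.getElem?_append_right]
    have hnext : ((F ++ [r]) ++ S).getD (F.length + 1) ' ' = S.headD ' ' := by
      rw [show F.length + 1 = (F ++ [r]).length by simp]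
      cases S with
      | nil => exact absurd rfl hS
      | cons a l => simp [List.getD, List.getElem?_append_right]
    have hupd : (if ((F ++ [r]) ++ S).getD F.length ' ' = '-' ∧ ((F ++ [r]) ++ S).getD (F.length + 1) ' ' = '?'
                 then ((F ++ [r]) ++ S).set F.length '?' else ((F ++ [r]) ++ S))
                = F ++ pvOut b r :: S := by
      rw [hi, hnext]
      have hhead : S.headD ' ' = '?' ↔ b = true := by
        rw [← hb]
        cases S with
        | nil => exact absurd rfl hS
        | cons a l => simp
      by_cases h2 : r = '-'
      · by_cases h3 : S.headD ' ' = '?'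
        · have hbt : b = true := hhead.mp h3
          rw [if_pos ⟨h2, h3⟩, List.append_assoc]
          simp [pvOut, h2, hbt, List.set_append_right, List.set_append]
        · have hbf : b = false := by
            cases b with
            | true => exact absurd (hhead.mpr rfl) h3
            | false => rfl
          rw [if_neg (by tauto)]
          simp [pvOut, h2, hbf]
      · rw [if_neg (by tauto)]
        by_cases h1 : r = '?' <;> simp [pvOut, h1, h2]
    rw [hupd]
    rw [show F ++ pvOut b r :: S = F ++ (pvOut b r :: S) from rfl]
    rw [ih (pvOut b r :: S) (pvNb b r) (by simp) (by simp [pvOut_flag])]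
    simp [pvPass1]

theorem pvBwd_eq (s : List Char) : pvBwd s (s.length - 1) = (pvPass1 false s.reverse).reverse := by
  induction s using List.reverseRecOn with
  | nil => simp [pvBwd, pvPass1]
  | append_singleton F r _ =>
    have h1 : (F ++ [r]).length - 1 = F.length := by simp
    rw [h1, pvBwd_go F [r] (pvNb false r) (by simp)
      (by by_cases h : r = '?' <;> by_cases h2 : r = '-' <;> simp_all [pvNb])]
    have hout : pvOut false r = r := by
      by_cases h : r = '?' <;> by_cases h2 : r = '-' <;> simp [pvOut, h, h2]
    simp [pvPass1, hout]

theorem main_eq (seq : String) (L : Bool) :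
    PropagateNoCoverageChar seq L = PropagateNoCoverageChar_alt seq L := by
  cases L with
  | true =>
    rw [portA_true, PropagateNoCoverageChar_alt]
    rw [if_pos rfl, pvBwd_eq]
  | false =>
    rw [portA_false, portA_true, PropagateNoCoverageChar_alt]
    rw [if_neg (by simp), pvFwd_eq]
    have hlen : seq.toList.length - 1 = (pvPass1 false seq.toList).length - 1 := by
      rw [pass1_length]
    rw [hlen, pvBwd_eq]
    simp

-- ===== VERDICT (by name: the statement is the Claim_ definition above) =====
theorem PropagateNoCoverageChar_spec : Claim_equal_PropagateNoCoverageChar := by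
  intro seq L _
  exact main_eq seq L
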